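-- pv_equiv track=rewrite | github.com/smallpythoncode/csci160 | project02/project02_kwj_csci160_spr22.py | dayOfBiggestDailyDifference
-- ===== SOURCE A (Python) =====
-- def biggestDailyDifference (highTemps, lowTemps):
--     """Identifies the biggest difference in daily temperature.
--
--     :param highTemps: Highs
--     :param lowTemps: Lows
--     :return: The biggest daily temp. difference for target month.
--     :rtype: int
--     """
--     biggestDifference = -1
--     if len(highTemps) == len(lowTemps):
--         for i in range(len(highTemps)):
--             currentDifference = highTemps[i] - lowTemps[i]
--             if currentDifference > biggestDifference:
--                 biggestDifference = currentDifference
--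
--     return biggestDifference
--
-- def dayOfBiggestDailyDifference (highTemps, lowTemps):
--     """Identifies the day of the biggest difference in temperature.
--
--     :param list highTemps: Highs
--     :param list lowTemps: Lows
--     :return: Days of biggest difference in daily temp. for target month
--     :rtype: list[int]
--     """
--     days = []
--     biggestDifference = biggestDailyDifference(highTemps, lowTemps)
--     if len(highTemps) == len(lowTemps):
--         for i in range(len(highTemps)):
--             if (highTemps[i] - lowTemps[i]) == biggestDifference:
--                 days.append(i + 1)
--
--     return days
-- ===== SOURCE B (Python) =====
-- def dayOfBiggestDailyDifference(highTemps, lowTemps):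
--     """Single-pass fusion: maintain the running maximum difference and the
--     list of days achieving it together, instead of a max pass plus a rescan."""
--     if len(highTemps) != len(lowTemps):
--         return []
--     biggest = -1
--     days = []
--     for i in range(len(highTemps)):
--         d = highTemps[i] - lowTemps[i]
--         if d > biggest:
--             biggest = d
--             days = [i + 1]
--         elif d == biggest:
--             days.append(i + 1)
--     return days
-- ===== Notes on version B (the rewrite author's own statement) =====
-- stated objective: alternative
-- what changed: Fuses A's two scans (helper computing the max difference, then a rescan collecting matching days) into a single loop maintaining the running maximum and the list of days achieving it together.
import Mathlib
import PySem

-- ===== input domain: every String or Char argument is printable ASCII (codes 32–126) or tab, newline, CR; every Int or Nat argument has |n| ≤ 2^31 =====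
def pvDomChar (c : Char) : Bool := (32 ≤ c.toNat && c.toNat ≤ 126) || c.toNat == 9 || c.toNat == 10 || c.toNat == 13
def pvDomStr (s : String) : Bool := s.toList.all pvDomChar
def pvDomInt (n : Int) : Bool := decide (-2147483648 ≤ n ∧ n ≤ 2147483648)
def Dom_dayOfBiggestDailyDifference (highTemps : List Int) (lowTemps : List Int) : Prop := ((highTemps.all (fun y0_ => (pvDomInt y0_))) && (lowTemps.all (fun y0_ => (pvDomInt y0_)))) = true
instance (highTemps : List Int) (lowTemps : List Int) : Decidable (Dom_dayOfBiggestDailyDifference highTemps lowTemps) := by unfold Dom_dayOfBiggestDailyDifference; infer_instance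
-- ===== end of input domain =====

-- B fuses A's two scans (max pass in the helper, then a rescan for matching days) into
-- one loop maintaining the running maximum and the matching-day list together.

-- ===== PORT A =====
-- helper biggestDailyDifference: max fold starting at -1, exactly as in A.
-- (pyGetD default 0 is never reached: the length guard keeps every range index in bounds.)
def biggestDailyDifferenceA (highTemps : List Int) (lowTemps : List Int) : Int :=
  if highTemps.length = lowTemps.length then
    (PySem.List.pyRange 0 (highTemps.length : Int) 1).foldl
      (fun biggestDifference i =>
        if PySem.List.pyGetD highTemps i 0 - PySem.List.pyGetD lowTemps i 0 > biggestDifference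
        then PySem.List.pyGetD highTemps i 0 - PySem.List.pyGetD lowTemps i 0
        else biggestDifference)
      (-1)
  else (-1)

def dayOfBiggestDailyDifference (highTemps : List Int) (lowTemps : List Int) : List Int :=
  let biggestDifference := biggestDailyDifferenceA highTemps lowTemps
  if highTemps.length = lowTemps.length then
    (PySem.List.pyRange 0 (highTemps.length : Int) 1).foldl
      (fun days i =>
        if PySem.List.pyGetD highTemps i 0 - PySem.List.pyGetD lowTemps i 0 = biggestDifference
        then days ++ [i + 1] else days)
      []
  else []

-- ===== PORT B =====
def dayOfBiggestDailyDifference_alt (highTemps : List Int) (lowTemps : List Int) : List Int :=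
  if highTemps.length ≠ lowTemps.length then []
  else
    ((PySem.List.pyRange 0 (highTemps.length : Int) 1).foldl
      (fun (s : Int × List Int) i =>
        if PySem.List.pyGetD highTemps i 0 - PySem.List.pyGetD lowTemps i 0 > s.1
        then (PySem.List.pyGetD highTemps i 0 - PySem.List.pyGetD lowTemps i 0, [i + 1])
        else if PySem.List.pyGetD highTemps i 0 - PySem.List.pyGetD lowTemps i 0 = s.1
        then (s.1, s.2 ++ [i + 1])
        else s)
      ((-1 : Int), ([] : List Int))).2

-- ===== PRECONDITION & SPEC =====
def Spec_dayOfBiggestDailyDifference (highTemps : List Int) (lowTemps : List Int) (out : List Int) : Prop := out = dayOfBiggestDailyDifference_alt highTemps lowTemps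
instance (highTemps : List Int) (lowTemps : List Int) (out : List Int) : Decidable (Spec_dayOfBiggestDailyDifference highTemps lowTemps out) := by unfold Spec_dayOfBiggestDailyDifference; infer_instance

-- ===== CLAIM (what is proved, stated in full; the proofs are below) =====
def Claim_equal_dayOfBiggestDailyDifference : Prop := ∀ (highTemps : List Int) (lowTemps : List Int), Dom_dayOfBiggestDailyDifference highTemps lowTemps → Spec_dayOfBiggestDailyDifference highTemps lowTemps (dayOfBiggestDailyDifference highTemps lowTemps)

-- ===== LEMMAS AND PROOFS =====

-- the daily difference at index i, the running max over range(0,n), and the matching days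
def pvDiff (h l : List Int) (i : Int) : Int :=
  PySem.List.pyGetD h i 0 - PySem.List.pyGetD l i 0

def pvMax (h l : List Int) (n : Int) : Int :=
  (PySem.List.pyRange 0 n 1).foldl (fun b i => max b (pvDiff h l i)) (-1)

def pvDays (h l : List Int) (n : Int) (t : Int) : List Int :=
  ((PySem.List.pyRange 0 n 1).filter (fun i => decide (pvDiff h l i = t))).map (fun i => i + 1)

-- A's max fold is pvMax
lemma maxA_eq (h l : List Int) (n : Int) :
    (PySem.List.pyRange 0 n 1).foldl
      (fun b i =>
        if PySem.List.pyGetD h i 0 - PySem.List.pyGetD l i 0 > b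
        then PySem.List.pyGetD h i 0 - PySem.List.pyGetD l i 0
        else b) (-1) = pvMax h l n := by
  unfold pvMax
  refine PySem.List.foldl_congr_mem _ _ _ _ ?_
  intro b i _
  simp only [pvDiff, max_def]
  split_ifs <;> omega

-- A's day-collecting fold is pvDays
lemma daysA_eq (h l : List Int) (n t : Int) :
    (PySem.List.pyRange 0 n 1).foldl
      (fun days i =>
        if PySem.List.pyGetD h i 0 - PySem.List.pyGetD l i 0 = t
        then days ++ [i + 1] else days) [] = pvDays h l n t := by
  have := PySem.List.foldl_append_if (fun i => decide (pvDiff h l i = t))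
    (fun i => i + 1) (PySem.List.pyRange 0 n 1) []
  simpa [pvDiff, pvDays] using this

-- every difference with index in range(0,n) is at most pvMax n
lemma diff_le_pvMax (h l : List Int) (n : Int) :
    ∀ i ∈ PySem.List.pyRange 0 n 1, pvDiff h l i ≤ pvMax h l n := by
  intro i hi
  have hmax : pvMax h l n
      = ((PySem.List.pyRange 0 n 1).map (pvDiff h l)).foldl max (-1) := by
    unfold pvMax; rw [List.foldl_map]
  rw [hmax]
  exact (PySem.List.le_foldl_max _ _).2 _ (List.mem_map_of_mem hi)

lemma pvMax_snoc (h l : List Int) (n : Nat) :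
    pvMax h l ((n : Int) + 1) = max (pvMax h l (n : Int)) (pvDiff h l (n : Int)) := by
  unfold pvMax
  rw [PySem.List.pyRange_one_succ_right (by positivity), List.foldl_append]
  rfl

lemma pvDays_snoc (h l : List Int) (n : Nat) (t : Int) :
    pvDays h l ((n : Int) + 1) t
      = pvDays h l (n : Int) t ++ (if pvDiff h l (n : Int) = t then [(n : Int) + 1] else []) := by
  unfold pvDays
  rw [PySem.List.pyRange_one_succ_right (by positivity), List.filter_append]
  by_cases hc : pvDiff h l (n : Int) = t <;> simp [hc]

-- B's fused fold computes the pair (running max, matching days) in one pass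
lemma fused_eq (h l : List Int) (n : Nat) :
    (PySem.List.pyRange 0 (n : Int) 1).foldl
      (fun (s : Int × List Int) i =>
        if PySem.List.pyGetD h i 0 - PySem.List.pyGetD l i 0 > s.1
        then (PySem.List.pyGetD h i 0 - PySem.List.pyGetD l i 0, [i + 1])
        else if PySem.List.pyGetD h i 0 - PySem.List.pyGetD l i 0 = s.1
        then (s.1, s.2 ++ [i + 1])
        else s)
      ((-1 : Int), ([] : List Int))
    = (pvMax h l (n : Int), pvDays h l (n : Int) (pvMax h l (n : Int))) := by
  induction n with
  | zero => simp [pvMax, pvDays]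
  | succ n ih =>
    have hcast : ((n + 1 : Nat) : Int) = (n : Int) + 1 := by push_cast; ring
    rw [hcast, PySem.List.pyRange_one_succ_right (by positivity), List.foldl_append, ih]
    simp only [List.foldl_cons, List.foldl_nil]
    have hd : PySem.List.pyGetD h ((n : Int)) 0 - PySem.List.pyGetD l ((n : Int)) 0
        = pvDiff h l (n : Int) := rfl
    rw [hd, pvMax_snoc, pvDays_snoc]
    have hle := diff_le_pvMax h l (n : Int)
    rcases lt_trichotomy (pvMax h l (n : Int)) (pvDiff h l (n : Int)) with hgt | heq | hlt
    · -- new strict maximum: the day list restarts at [n+1]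
      rw [if_pos hgt, max_eq_right hgt.le]
      have hfil : pvDays h l (n : Int) (pvDiff h l (n : Int)) = [] := by
        unfold pvDays
        rw [List.filter_eq_nil_iff.mpr (by
          intro i hi
          have := hle i hi
          simp only [decide_eq_true_eq]
          omega)]
        rfl
      rw [hfil, if_pos rfl]
      simp
    · -- ties the current maximum: append day n+1
      rw [if_neg (by omega), if_pos heq.symm, max_eq_left heq.ge, if_pos heq.symm]
    · -- below the current maximum: state unchanged
      rw [if_neg (by omega), if_neg (by omega), max_eq_left hlt.le, if_neg (by omega)]
      simp

-- ===== VERDICT (by name: the statement is the Claim_ definition above) =====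
theorem dayOfBiggestDailyDifference_spec : Claim_equal_dayOfBiggestDailyDifference := by
  intro h l _
  unfold Spec_dayOfBiggestDailyDifference
  by_cases hlen : h.length = l.length
  · have hb : biggestDailyDifferenceA h l = pvMax h l (h.length : Int) := by
      unfold biggestDailyDifferenceA
      rw [if_pos hlen, maxA_eq]
    show dayOfBiggestDailyDifference h l = _
    unfold dayOfBiggestDailyDifference dayOfBiggestDailyDifference_alt
    rw [if_neg (not_ne_iff.mpr hlen)]
    simp only [hb, if_pos hlen]
    rw [daysA_eq, fused_eq h l h.length]
  · unfold dayOfBiggestDailyDifference dayOfBiggestDailyDifference_alt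
    rw [if_neg hlen, if_pos hlen]
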